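-- pv_equiv track=rewrite | github.com/Gabriella0224/beadando | beadando_21_vegso.py | oszthato
-- ===== SOURCE A (Python) =====
-- def oszthato(szam,meddig): #létrehozunk egy osztható függvényt ,ami két paramétert kap a vizsgált számot és az N értéket.(1-N)
--   for i in range(1,meddig+1):#0-val nem osztunk,nem szorzunk!ezért 1-től indulunk
--     if szam % i != 0: #megnézem osztható-e
--       return False #ha nem akkor False-al tér vissza
--     elif ((i<meddig) and (szam % i == 0)):#ha osztható,de még nem értük el a N számot akkor tovább megyünk.
--       continue #menjen tovább a következőre
--     else:
--       return True #minden egyéb esetben igazzal tér vissza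
-- ===== SOURCE B (Python) =====
-- def gcd(a, b):
--     while b:
--         a, b = b, a % b
--     return a
--
-- def oszthato(szam, meddig):
--     if meddig < 1:
--         return None  # A also returns None here (loop body never runs)
--     if szam == 0:
--         return True  # 0 is divisible by everything
--     # fold a running lcm L of 1..i; once L exceeds |szam|, szam cannot be
--     # divisible by it, so we can stop early
--     L = 1
--     i = 1
--     while i <= meddig and L <= abs(szam):
--         L = L * i // gcd(L, i)
--         i += 1
--     return L <= abs(szam) and szam % L == 0
-- ===== Notes on version B (the rewrite author's own statement) =====
-- stated objective: alternative
-- what changed: B folds a running least common multiple over 1..meddig (stopping once it exceeds |szam|, since then no divisibility is possible) and does a single final divisibility test, instead of A's per-divisor scan with early exit.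
-- outside the precondition, e.g. on oszthato(5, 0): A returns None, B returns None
import Mathlib
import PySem

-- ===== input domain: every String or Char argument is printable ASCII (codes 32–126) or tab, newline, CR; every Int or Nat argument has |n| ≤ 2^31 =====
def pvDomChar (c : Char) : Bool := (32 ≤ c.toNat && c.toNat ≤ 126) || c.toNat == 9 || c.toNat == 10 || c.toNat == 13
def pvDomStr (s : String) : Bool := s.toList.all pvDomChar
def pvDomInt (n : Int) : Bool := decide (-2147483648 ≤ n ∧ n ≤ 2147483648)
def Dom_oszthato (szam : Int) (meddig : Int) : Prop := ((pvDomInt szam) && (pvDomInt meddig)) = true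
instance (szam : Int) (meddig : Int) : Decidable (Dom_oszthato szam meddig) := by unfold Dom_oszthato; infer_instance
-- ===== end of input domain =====

-- B replaces A's per-divisor scan by folding a running least common multiple over 1..meddig
-- and doing one final divisibility test (objective: alternative algorithm, not faster).

-- ===== PORT A =====
-- the for-loop over range(1, meddig+1) with its early returns, as structural
-- recursion on the number of remaining iterations (i is the loop counter);
-- `none` = running off the end (Python returns None there)
def oszthatoGo (szam meddig : Int) : Nat → Int → Option Bool
  | 0, _ => none
  | n + 1, i =>
    if PySem.Int.mod szam i ≠ 0 then some false
    else if i < meddig ∧ PySem.Int.mod szam i = 0 then oszthatoGo szam meddig n (i + 1)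
    else some true

def oszthato (szam : Int) (meddig : Int) : Bool :=
  (oszthatoGo szam meddig meddig.toNat 1).getD false
  -- `.getD false` only packs the Option into the required Bool type; the `none`
  -- case (meddig < 1, Python returns None) lies outside Pre_oszthato

-- ===== PORT B =====
-- Source B's hand-written Euclid (while b: a, b = b, a % b), as structural recursion
-- on the number of remaining iterations (|b| strictly decreases each step, so
-- |b| + 1 iterations always suffice)
def pyGcdGo : Nat → Int → Int → Int
  | 0, a, _ => a
  | n + 1, a, b => if b = 0 then a else pyGcdGo n b (PySem.Int.mod a b)

def pyGcd (a b : Int) : Int := pyGcdGo (b.natAbs + 1) a b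

-- Source B's while loop (while i <= meddig and L <= abs(szam): L = L*i//gcd(L,i); i += 1),
-- as structural recursion on the number of remaining iterations (≤ meddig)
def altLoop (szam meddig : Int) : Nat → Int → Int → Int
  | 0, _, L => L
  | n + 1, i, L =>
    if i ≤ meddig ∧ L ≤ |szam| then
      altLoop szam meddig n (i + 1) (PySem.Int.floordiv (L * i) (pyGcd L i))
    else L

def oszthato_alt (szam : Int) (meddig : Int) : Bool :=
  if meddig < 1 then false  -- Python B returns None here; outside Pre_oszthato
  else if szam = 0 then true
  else
    let L := altLoop szam meddig meddig.toNat 1 1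
    decide (L ≤ |szam| ∧ PySem.Int.mod szam L = 0)

-- ===== PRECONDITION & SPEC =====
-- Pre_ excludes meddig < 1, where the Python A's loop body never runs and A returns
-- None, which is not a value of the declared Bool type.
def Pre_oszthato (szam : Int) (meddig : Int) : Prop := 1 ≤ meddig
instance (szam : Int) (meddig : Int) : Decidable (Pre_oszthato szam meddig) := by
  unfold Pre_oszthato; infer_instance

def pvWitness_oszthato : Int × Int := (12, 3)

def Spec_oszthato (szam : Int) (meddig : Int) (out : Bool) : Prop := out = oszthato_alt szam meddig
instance (szam : Int) (meddig : Int) (out : Bool) : Decidable (Spec_oszthato szam meddig out) := by unfold Spec_oszthato; infer_instance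

-- ===== CLAIM (what is proved, stated in full; the proofs are below) =====
def Claim_equal_oszthato : Prop := ∀ (szam : Int) (meddig : Int), Dom_oszthato szam meddig → Pre_oszthato szam meddig → Spec_oszthato szam meddig (oszthato szam meddig)

-- ===== LEMMAS AND PROOFS =====

-- pyGcd computes Int.gcd (all our call sites have nonnegative arguments, but this holds generally)
theorem gcd_emod_step (a b : Int) : Int.gcd b (a % b) = Int.gcd a b := by
  have key : a = b * (a / b) + a % b := (Int.ediv_add_emod a b).symm
  apply Nat.dvd_antisymm
  · apply Int.dvd_gcd
    · calc (Int.gcd b (a % b) : Int) ∣ b * (a / b) + a % b :=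
        Dvd.dvd.add (Dvd.dvd.mul_right (Int.gcd_dvd_left ..) _) (Int.gcd_dvd_right ..)
      _ = a := key.symm
    · exact Int.gcd_dvd_left ..
  · apply Int.dvd_gcd
    · exact Int.gcd_dvd_right ..
    · have : a % b = a - b * (a / b) := by omega
      rw [this]
      exact Dvd.dvd.sub (Int.gcd_dvd_left ..) (Dvd.dvd.mul_right (Int.gcd_dvd_right ..) _)

theorem pyGcdGo_eq : ∀ (n : Nat) (a b : Int), 0 ≤ a → 0 ≤ b → b.natAbs < n →
    pyGcdGo n a b = (Int.gcd a b : Int) := by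
  intro n
  induction n with
  | zero => intro a b _ _ h; omega
  | succ n ih =>
    intro a b ha hb hn
    rcases eq_or_lt_of_le hb with h0 | hpos
    · rw [pyGcdGo, if_pos h0.symm, ← h0]
      simp [Int.natAbs_of_nonneg ha]
    · rw [pyGcdGo, if_neg (by omega : ¬ b = 0)]
      have hm1 := PySem.Int.mod_nonneg a hpos
      have hm2 := PySem.Int.mod_lt a hpos
      rw [ih b (PySem.Int.mod a b) hpos.le hm1 (by omega)]
      rw [PySem.Int.mod_eq_emod_of_pos hpos]
      exact congrArg _ (gcd_emod_step a b)

theorem pyGcd_eq_gcd (a b : Int) (ha : 0 ≤ a) (hb : 0 ≤ b) :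
    pyGcd a b = (Int.gcd a b : Int) :=
  pyGcdGo_eq (b.natAbs + 1) a b ha hb (by omega)

theorem mul_eq_gcd_mul_lcm (L i : Int) (hL : 0 < L) (hi : 0 < i) :
    L * i = (Int.gcd L i : Int) * (Int.lcm L i : Int) := by
  have hL' : (L.natAbs : Int) = L := Int.natAbs_of_nonneg hL.le
  have hi' : (i.natAbs : Int) = i := Int.natAbs_of_nonneg hi.le
  calc L * i = ((L.natAbs * i.natAbs : Nat) : Int) := by push_cast; rw [abs_of_pos hL, abs_of_pos hi]
    _ = ((Int.gcd L i * Int.lcm L i : Nat) : Int) := by rw [Int.gcd_mul_lcm]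
    _ = (Int.gcd L i : Int) * (Int.lcm L i : Int) := by push_cast; ring

theorem step_eq_lcm (L i : Int) (hL : 0 < L) (hi : 0 < i) :
    PySem.Int.floordiv (L * i) (pyGcd L i) = (Int.lcm L i : Int) := by
  have hg : 0 < Int.gcd L i := Int.gcd_pos_of_ne_zero_left i (by omega)
  have hg' : (0 : Int) < (Int.gcd L i : Int) := by exact_mod_cast hg
  rw [pyGcd_eq_gcd L i hL.le hi.le,
      PySem.Int.floordiv_eq_ediv_of_pos hg',
      mul_eq_gcd_mul_lcm L i hL hi,
      Int.mul_ediv_cancel_left _ (by omega)]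

theorem lcm_pos' (L i : Int) (hL : 0 < L) (hi : 0 < i) : (0 : Int) < (Int.lcm L i : Int) := by
  have := mul_eq_gcd_mul_lcm L i hL hi
  nlinarith [Int.gcd_pos_of_ne_zero_left (a := L) i (by omega),
    (by positivity : (0:Int) < L * i)]

theorem lcm_dvd_iff' (L i s : Int) :
    ((Int.lcm L i : Int) ∣ s) ↔ (L ∣ s ∧ i ∣ s) := by
  constructor
  · intro h
    exact ⟨dvd_trans (Int.dvd_lcm_left L i) h, dvd_trans (Int.dvd_lcm_right L i) h⟩
  · rintro ⟨h1, h2⟩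
    exact Int.coe_lcm_dvd h1 h2


-- B's while loop: given that L divides exactly what all of 1..i-1 divide, the final
-- bounded-lcm test decides divisibility by all of 1..meddig
theorem altLoopB (szam meddig : Int) (hs : szam ≠ 0) :
    ∀ (n : Nat) (i L : Int), n = (meddig + 1 - i).toNat → 1 ≤ i → i ≤ meddig + 1 →
    0 < L →
    (∀ s : Int, L ∣ s ↔ ∀ j ∈ PySem.List.pyRange 1 i 1, j ∣ s) →
    ((altLoop szam meddig n i L ≤ |szam| ∧
        PySem.Int.mod szam (altLoop szam meddig n i L) = 0) ↔
      (∀ j ∈ PySem.List.pyRange 1 (meddig + 1) 1, j ∣ szam)) := by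
  intro n
  induction n with
  | zero =>
    intro i L hn hi1 hi2 hL hchar
    have hieq : i = meddig + 1 := by omega
    subst hieq
    simp only [altLoop]
    constructor
    · rintro ⟨_, h2⟩
      exact (hchar szam).mp ((PySem.Int.mod_eq_zero_iff_dvd szam L).mp h2)
    · intro hall
      have hLd : L ∣ szam := (hchar szam).mpr hall
      exact ⟨Int.le_of_dvd (abs_pos.mpr hs) ((dvd_abs ..).mpr hLd),
        (PySem.Int.mod_eq_zero_iff_dvd szam L).mpr hLd⟩
  | succ n ih =>
    intro i L hn hi1 hi2 hL hchar
    have hi : i ≤ meddig := by omega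
    simp only [altLoop]
    by_cases hcond : i ≤ meddig ∧ L ≤ |szam|
    · rw [if_pos hcond]
      have hipos : 0 < i := by omega
      have hstep := step_eq_lcm L i hL hipos
      have hL' : 0 < PySem.Int.floordiv (L * i) (pyGcd L i) := by
        rw [hstep]; exact lcm_pos' L i hL hipos
      refine ih (i + 1) _ (by omega) (by omega) (by omega) hL' ?_
      intro s
      rw [hstep, lcm_dvd_iff', hchar s,
        PySem.List.pyRange_one_succ_right (by omega : (1 : Int) ≤ i)]
      simp only [List.mem_append, List.mem_singleton]
      constructor
      · rintro ⟨h1, h2⟩ j hj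
        rcases hj with hj | rfl
        · exact h1 j hj
        · exact h2
      · intro h
        exact ⟨fun j hj => h j (Or.inl hj), h i (Or.inr rfl)⟩
    · rw [if_neg hcond]
      have hLs : ¬ L ≤ |szam| := fun h => hcond ⟨hi, h⟩
      constructor
      · rintro ⟨h1, _⟩
        exact absurd h1 hLs
      · intro hall
        exfalso
        apply hLs
        have hLd : L ∣ szam := (hchar szam).mpr (fun j hj => hall j (by
          rw [PySem.List.mem_pyRange_one] at hj ⊢; omega))
        exact Int.le_of_dvd (abs_pos.mpr hs) ((dvd_abs ..).mpr hLd)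

-- A's loop from counter k (with n remaining iterations) returns `all of k..meddig divide`
theorem goA (szam m : Int) :
    ∀ (n : Nat) (k : Int), n = (m + 1 - k).toNat → 1 ≤ k → k ≤ m →
    oszthatoGo szam m n k =
      some ((PySem.List.pyRange k (m + 1) 1).all (fun i => PySem.Int.mod szam i == 0)) := by
  intro n
  induction n with
  | zero => intro k hn hk1 hk2; omega
  | succ n ih =>
    intro k hn hk1 hk2
    rw [PySem.List.pyRange_one_cons (by omega : k < m + 1)]
    simp only [oszthatoGo]
    by_cases hmod : PySem.Int.mod szam k = 0
    · by_cases hk : k < m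
      · rw [if_neg (by simpa using hmod), if_pos ⟨hk, hmod⟩,
          ih (k + 1) (by omega) (by omega) (by omega)]
        simp [hmod]
      · have hkm : k = m := by omega
        rw [if_neg (by simpa using hmod), if_neg (by tauto)]
        rw [PySem.List.pyRange_one_eq_nil (by omega : m + 1 ≤ k + 1)]
        simp [hmod]
    · rw [if_pos (by simpa using hmod)]
      simp [hmod]

-- ===== VERDICT (by name: the statement is the Claim_ definition above) =====
theorem oszthato_spec : Claim_equal_oszthato := by
  intro szam meddig _ hpre
  have hm : 1 ≤ meddig := hpre
  unfold Spec_oszthato oszthato oszthato_alt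
  rw [if_neg (by omega), goA szam meddig meddig.toNat 1 (by omega) le_rfl hm]
  simp only [Option.getD_some]
  by_cases hs : szam = 0
  · rw [if_pos hs]
    subst hs
    simp [PySem.Int.mod_eq_zero_iff_dvd]
  · rw [if_neg hs]
    have hchar : ∀ s : Int, (1 : Int) ∣ s ↔ ∀ j ∈ PySem.List.pyRange 1 1 1, j ∣ s := by
      intro s
      rw [PySem.List.pyRange_one_eq_nil le_rfl]
      simp
    have hkey := altLoopB szam meddig hs meddig.toNat 1 1 (by omega) le_rfl
      (by omega) one_pos hchar
    rw [Bool.eq_iff_iff]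
    simp only [List.all_eq_true, beq_iff_eq, decide_eq_true_eq,
      PySem.Int.mod_eq_zero_iff_dvd] at hkey ⊢
    exact hkey.symm
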